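-- pv_equiv track=rewrite | github.com/w1gglyw0bbly/Random-Stuff | CS112Spring2022/rdeangel_242_Lab4.py | calcList
-- ===== SOURCE A (Python) =====
-- def calcSum(number):
--     result = 0
--     for x in range(number):
--         result += x
--     return result
--
-- def calcList(number_list):
--     tempList = []
--     result = 1
--     #Looping through list items
--     for x in number_list:
--         tempList.append(calcSum(x))
--
--     #Multiply added numbers
--     for z in tempList:
--         result *= z
--     return result
-- ===== SOURCE B (Python) =====
-- def calcList(number_list):
--     result = 1
--     for x in number_list:
--         result *= x * (x - 1) // 2 if x > 1 else 0
--     return result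
-- ===== Notes on version B (the rewrite author's own statement) =====
-- stated objective: faster
-- what changed: Replaced calcSum's O(x) summation loop and the intermediate tempList with the closed form x*(x-1)//2 (0 for x<=1) multiplied in a single pass.
import Mathlib
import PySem

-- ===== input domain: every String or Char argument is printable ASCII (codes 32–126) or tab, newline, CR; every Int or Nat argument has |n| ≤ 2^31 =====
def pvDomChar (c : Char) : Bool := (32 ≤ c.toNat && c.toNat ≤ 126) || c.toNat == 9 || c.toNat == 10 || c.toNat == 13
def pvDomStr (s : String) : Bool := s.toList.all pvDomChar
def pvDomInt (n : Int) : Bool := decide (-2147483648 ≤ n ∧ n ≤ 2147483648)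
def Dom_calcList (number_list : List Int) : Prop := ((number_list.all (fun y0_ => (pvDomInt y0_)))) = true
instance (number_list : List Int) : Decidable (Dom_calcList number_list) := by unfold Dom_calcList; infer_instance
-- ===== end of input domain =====

-- B replaces A's per-element summation loop (and the intermediate tempList) by the
-- closed form x*(x-1)//2 multiplied in a single pass; objective: faster (asymptotic).

-- ===== PORT A =====
def calcSum (number : Int) : Int :=
  (PySem.List.pyRange 0 number 1).foldl (fun result x => result + x) 0

def calcList (number_list : List Int) : Int :=
  let tempList := number_list.foldl (fun t x => t ++ [calcSum x]) []
  tempList.foldl (fun result z => result * z) 1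

-- ===== PORT B =====
def calcList_alt (number_list : List Int) : Int :=
  number_list.foldl
    (fun result x => result * (if 1 < x then PySem.Int.floordiv (x * (x - 1)) 2 else 0)) 1

-- ===== PRECONDITION & SPEC =====
def Spec_calcList (number_list : List Int) (out : Int) : Prop := out = calcList_alt number_list
instance (number_list : List Int) (out : Int) : Decidable (Spec_calcList number_list out) := by unfold Spec_calcList; infer_instance

-- ===== CLAIM (what is proved, stated in full; the proofs are below) =====
def Claim_equal_calcList : Prop := ∀ (number_list : List Int), Dom_calcList number_list → Spec_calcList number_list (calcList number_list)

-- ===== LEMMAS AND PROOFS =====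

-- 2 × (0 + 1 + ⋯ + (n-1)) = n(n-1)
theorem pv_two_mul_sum (n : Nat) :
    2 * (PySem.List.pyRange 0 (n : Int) 1).foldl (fun result x => result + x) 0
      = (n : Int) * ((n : Int) - 1) := by
  induction n with
  | zero => simp [PySem.List.pyRange_one_eq_nil]
  | succ m ih =>
    have h : PySem.List.pyRange 0 ((m : Int) + 1) 1
        = PySem.List.pyRange 0 (m : Int) 1 ++ [(m : Int)] :=
      PySem.List.pyRange_one_succ_right (by positivity)
    push_cast
    rw [h, List.foldl_append]
    simp only [List.foldl]
    ring_nf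
    ring_nf at ih
    omega

theorem pv_calcSum_closed (x : Int) :
    calcSum x = if 1 < x then PySem.Int.floordiv (x * (x - 1)) 2 else 0 := by
  by_cases hx : 1 < x
  · simp only [hx, if_true]
    obtain ⟨n, hn⟩ : ∃ n : Nat, x = (n : Int) := ⟨x.toNat, by omega⟩
    subst hn
    have h2 := pv_two_mul_sum n
    rw [PySem.Int.floordiv_eq_ediv_of_pos (by norm_num)]
    unfold calcSum
    omega
  · simp only [hx, if_false]
    unfold calcSum
    by_cases h0 : x ≤ 0
    · rw [PySem.List.pyRange_one_eq_nil h0]; rfl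
    · have h1 : x = 0 + 1 := by omega
      rw [h1, PySem.List.pyRange_one_singleton]; rfl

theorem pv_tempList (l : List Int) (acc : List Int) :
    l.foldl (fun t x => t ++ [calcSum x]) acc = acc ++ l.map calcSum := by
  induction l generalizing acc with
  | nil => simp
  | cons a t ih => simp [ih]

-- ===== VERDICT (by name: the statement is the Claim_ definition above) =====
theorem calcList_spec : Claim_equal_calcList := by
  intro number_list _
  unfold Spec_calcList calcList calcList_alt
  rw [pv_tempList, List.nil_append, List.foldl_map]
  simp only [pv_calcSum_closed]
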